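-- pv_equiv track=rewrite | github.com/Alex111cat/SmartGarbage2 | appgarb/utils.py | get_count_days
-- ===== SOURCE A (Python) =====
-- def get_count_days(f, predictions):
--     count = 0
--     for incr in predictions:
--         if f > 100:
--             break
--         f += incr
--         count += 1
--     return count
-- ===== SOURCE B (Python) =====
-- def get_count_days(f, predictions):
--     # Two-pass prefix-sum formulation: build the running values f, f+p0, f+p0+p1, ...
--     # and return the index of the first one exceeding 100, else len(predictions).
--     prefixes = [f]
--     for incr in predictions:
--         f += incr
--         prefixes.append(f)
--     for i, v in enumerate(prefixes):
--         if v > 100: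
--             return i
--     return len(predictions)
-- ===== Notes on version B (the rewrite author's own statement) =====
-- stated objective: alternative
-- what changed: Replaces the single-pass conditional counter with a break by a two-pass prefix-sum formulation: build the list of running values and return the index of the first one exceeding 100 (or the number of predictions).
import Mathlib
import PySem

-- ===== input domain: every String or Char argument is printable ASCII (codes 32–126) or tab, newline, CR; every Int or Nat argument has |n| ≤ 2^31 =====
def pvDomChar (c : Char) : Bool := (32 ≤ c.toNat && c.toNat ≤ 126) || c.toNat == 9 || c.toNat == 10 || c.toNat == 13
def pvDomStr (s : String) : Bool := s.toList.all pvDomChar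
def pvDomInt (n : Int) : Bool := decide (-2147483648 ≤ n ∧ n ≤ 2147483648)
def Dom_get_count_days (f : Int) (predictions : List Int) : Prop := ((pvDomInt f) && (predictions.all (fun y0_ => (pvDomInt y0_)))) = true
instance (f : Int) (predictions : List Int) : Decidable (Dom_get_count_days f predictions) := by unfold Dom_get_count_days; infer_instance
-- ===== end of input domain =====

-- B replaces A's single-pass counter-with-break by a two-pass prefix-sum list plus first-index scan (alternative decomposition, same cost).


-- ===== PORT A =====
-- loop with top-of-body break: if f > 100 stop, else add incr and count it
def getCountDaysLoop (f : Int) : List Int → Int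
  | [] => 0
  | incr :: rest => if f > 100 then 0 else getCountDaysLoop (f + incr) rest + 1

def get_count_days (f : Int) (predictions : List Int) : Int :=
  getCountDaysLoop f predictions

-- ===== PORT B =====
-- first pass of Source B: state (f, prefixes), appending the running value after each increment
def buildPrefixes (st : Int × List Int) : List Int → Int × List Int :=
  fun preds => preds.foldl (fun st incr => (st.1 + incr, st.2 ++ [st.1 + incr])) st

-- second pass of Source B: enumerate the prefixes, return the first index whose value > 100
def firstOver (i : Int) : List Int → Option Int
  | [] => none
  | v :: rest => if v > 100 then some i else firstOver (i + 1) rest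

def get_count_days_alt (f : Int) (predictions : List Int) : Int :=
  let prefixes := (buildPrefixes (f, [f]) predictions).2
  match firstOver 0 prefixes with
  | some i => i
  | none => (predictions.length : Int)

-- ===== PRECONDITION & SPEC =====
def Spec_get_count_days (f : Int) (predictions : List Int) (out : Int) : Prop := out = get_count_days_alt f predictions
instance (f : Int) (predictions : List Int) (out : Int) : Decidable (Spec_get_count_days f predictions out) := by unfold Spec_get_count_days; infer_instance

-- ===== CLAIM (what is proved, stated in full; the proofs are below) =====
def Claim_equal_get_count_days : Prop := ∀ (f : Int) (predictions : List Int), Dom_get_count_days f predictions → Spec_get_count_days f predictions (get_count_days f predictions)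

-- ===== LEMMAS AND PROOFS =====

-- the prefix list built by the fold, as a pure recursive function
def prefTail (f : Int) : List Int → List Int
  | [] => []
  | incr :: rest => (f + incr) :: prefTail (f + incr) rest

lemma buildPrefixes_eq (preds : List Int) : ∀ (f : Int) (acc : List Int),
    (buildPrefixes (f, acc) preds).2 = acc ++ prefTail f preds := by
  induction preds with
  | nil => intro f acc; simp [buildPrefixes, prefTail]
  | cons incr rest ih =>
      intro f acc
      simp only [buildPrefixes, List.foldl_cons] at *
      rw [ih (f + incr) (acc ++ [f + incr])]
      simp [prefTail]

lemma firstOver_shift (xs : List Int) : ∀ i : Int,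
    firstOver (i + 1) xs = (firstOver i xs).map (· + 1) := by
  induction xs with
  | nil => intro i; simp [firstOver]
  | cons v rest ih =>
      intro i
      by_cases h : v > 100
      · simp [firstOver, h]
      · simp [firstOver, h, ih]

lemma main_eq (preds : List Int) : ∀ f : Int,
    getCountDaysLoop f preds =
      (match firstOver 0 (f :: prefTail f preds) with
       | some i => i
       | none => (preds.length : Int)) := by
  induction preds with
  | nil =>
      intro f
      by_cases h : f > 100 <;> simp [getCountDaysLoop, prefTail, firstOver, h]
  | cons incr rest ih =>
      intro f
      by_cases h : f > 100
      · simp [getCountDaysLoop, firstOver, h]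
      · have h1 : firstOver 0 (f :: prefTail f (incr :: rest)) =
            (firstOver 0 ((f + incr) :: prefTail (f + incr) rest)).map (· + 1) := by
          rw [prefTail]
          have h2 : firstOver 0 (f :: (f + incr) :: prefTail (f + incr) rest)
              = firstOver (0 + 1) ((f + incr) :: prefTail (f + incr) rest) := by
            simp [firstOver, h]
          rw [h2, firstOver_shift]
        rw [h1, getCountDaysLoop, if_neg h, ih (f + incr)]
        cases firstOver 0 ((f + incr) :: prefTail (f + incr) rest) with
        | none => simp
        | some j => simp

-- ===== VERDICT (by name: the statement is the Claim_ definition above) =====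
theorem get_count_days_spec : Claim_equal_get_count_days := by
  intro f preds _
  unfold Spec_get_count_days get_count_days get_count_days_alt
  rw [buildPrefixes_eq preds f [f]]
  simpa using main_eq preds f
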